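-- pv_equiv track=rewrite | github.com/coilysiren/eco-map-generator | eco_cycle_prep/narrative/features.py | _coastline_count
-- ===== SOURCE A (Python) =====
-- def _coastline_count(
--     water_mask: list[list[bool]], land_mask: list[list[bool]]
-- ) -> int:
--     """Count land pixels with at least one 4-neighbor water pixel.
--
--     High counts relative to the square-root of land area indicate a ragged,
--     inlet-heavy coastline; low counts indicate smooth continental edges."""
--     h = len(water_mask)
--     w = len(water_mask[0]) if h else 0
--     count = 0
--     for y in range(h):
--         for x in range(w):
--             if not land_mask[y][x]:
--                 continue
--             if (
--                 (x > 0 and water_mask[y][x - 1]) or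
--                 (x < w - 1 and water_mask[y][x + 1]) or
--                 (y > 0 and water_mask[y - 1][x]) or
--                 (y < h - 1 and water_mask[y + 1][x])
--             ):
--                 count += 1
--     return count
-- ===== SOURCE B (Python) =====
-- def _coastline_count(
--     water_mask: list[list[bool]], land_mask: list[list[bool]]
-- ) -> int:
--     """Count land pixels with at least one 4-neighbor water pixel, by scanning
--     water pixels and collecting their land neighbors into a dedup set."""
--     h = len(water_mask)
--     w = len(water_mask[0]) if h else 0
--     coast = set()
--     for y in range(h):
--         for x in range(w):
--             if not water_mask[y][x]:
--                 continue
--             for ny, nx in ((y, x - 1), (y, x + 1), (y - 1, x), (y + 1, x)):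
--                 if 0 <= ny < h and 0 <= nx < w and land_mask[ny][nx]:
--                     coast.add((ny, nx))
--     return len(coast)
-- ===== Notes on version B (the rewrite author's own statement) =====
-- stated objective: alternative
-- what changed: B reverses the traversal: instead of checking each land pixel for a water 4-neighbor with a running counter, it scans water pixels, adds each in-bounds land 4-neighbor to a dedup set, and returns the set's size.
-- outside the precondition, e.g. on _coastline_count([[False, False], [False]], [[False, False], [False, False]]): A returns 0, B raises IndexError
import Mathlib
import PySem

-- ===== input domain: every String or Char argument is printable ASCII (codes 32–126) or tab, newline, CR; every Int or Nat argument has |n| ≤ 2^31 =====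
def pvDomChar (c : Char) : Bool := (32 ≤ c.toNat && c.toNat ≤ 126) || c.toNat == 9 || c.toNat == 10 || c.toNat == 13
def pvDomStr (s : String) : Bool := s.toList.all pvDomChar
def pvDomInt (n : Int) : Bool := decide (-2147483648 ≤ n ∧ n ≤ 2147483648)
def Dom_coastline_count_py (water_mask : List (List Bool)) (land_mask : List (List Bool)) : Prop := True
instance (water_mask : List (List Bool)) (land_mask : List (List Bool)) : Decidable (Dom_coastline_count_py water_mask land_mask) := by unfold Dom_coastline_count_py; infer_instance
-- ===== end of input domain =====

-- B reverses the traversal: it scans WATER pixels and collects each in-bounds land 4-neighbor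
-- into a dedup set, returning its size, instead of A's per-land-pixel check with a running counter.

-- shared index helper: m[y][x] (exact under Pre_, where every access is in range)
def pvW (m : List (List Bool)) (y x : Nat) : Bool := (m.getD y []).getD x false

-- ===== PORT A =====
def coastline_count_py (water_mask : List (List Bool)) (land_mask : List (List Bool)) : Int :=
  let h := water_mask.length
  let w := if h = 0 then 0 else (water_mask.getD 0 []).length
  (List.range h).foldl (fun count y =>
    (List.range w).foldl (fun count x =>
      if pvW land_mask y x = false then count
      else if (decide (0 < x) && pvW water_mask y (x - 1)) ||
              (decide (x < w - 1) && pvW water_mask y (x + 1)) ||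
              (decide (0 < y) && pvW water_mask (y - 1) x) ||
              (decide (y < h - 1) && pvW water_mask (y + 1) x)
      then count + 1 else count) count) 0

-- ===== PORT B =====
-- the four candidate neighbors (y, x-1), (y, x+1), (y-1, x), (y+1, x) as Python ints
def pvNbrs (y x : Nat) : List (Int × Int) :=
  [((y : Int), (x : Int) - 1), ((y : Int), (x : Int) + 1),
   ((y : Int) - 1, (x : Int)), ((y : Int) + 1, (x : Int))]

-- in-bounds test plus land lookup for a candidate neighbor
def pvOk (land_mask : List (List Bool)) (h w : Nat) (p : Int × Int) : Bool :=
  decide (0 ≤ p.1) && decide (p.1 < (h : Int)) && decide (0 ≤ p.2) && decide (p.2 < (w : Int)) &&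
    pvW land_mask p.1.toNat p.2.toNat

def coastline_count_py_alt (water_mask : List (List Bool)) (land_mask : List (List Bool)) : Int :=
  let h := water_mask.length
  let w := if h = 0 then 0 else (water_mask.getD 0 []).length
  let coast : PySem.Set (Int × Int) :=
    (List.range h).foldl (fun s y =>
      (List.range w).foldl (fun s x =>
        if pvW water_mask y x = false then s
        else (pvNbrs y x).foldl (fun s p =>
          if pvOk land_mask h w p then PySem.Set.add s p else s) s) s) PySem.Set.empty
  (coast.length : Int)

-- ===== PRECONDITION & SPEC =====
-- Pre_ excludes exactly the inputs on which indexing raises IndexError in one of the two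
-- Pythons: ragged water rows shorter than row 0, or a land mask without an entry at some
-- (y, x) with y < h, x < w.  (A returns on a few of these when every reached land entry is
-- falsy — see the cite — but B's water scan reads every water_mask[y][x] and raises there.)
def Pre_coastline_count_py (water_mask : List (List Bool)) (land_mask : List (List Bool)) : Prop :=
  let h := water_mask.length
  let w := if h = 0 then 0 else (water_mask.getD 0 []).length
  w = 0 ∨ ((∀ row ∈ water_mask, w ≤ row.length) ∧ h ≤ land_mask.length ∧
           ∀ row ∈ land_mask.take h, w ≤ row.length)
instance (water_mask : List (List Bool)) (land_mask : List (List Bool)) : Decidable (Pre_coastline_count_py water_mask land_mask) := by unfold Pre_coastline_count_py; infer_instance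

def pvWitness_coastline_count_py : List (List Bool) × List (List Bool) :=
  ([[false, true], [true, false]], [[true, false], [false, true]])

def Spec_coastline_count_py (water_mask : List (List Bool)) (land_mask : List (List Bool)) (out : Int) : Prop := out = coastline_count_py_alt water_mask land_mask
instance (water_mask : List (List Bool)) (land_mask : List (List Bool)) (out : Int) : Decidable (Spec_coastline_count_py water_mask land_mask out) := by unfold Spec_coastline_count_py; infer_instance

-- ===== CLAIM (what is proved, stated in full; the proofs are below) =====
def Claim_equal_coastline_count_py : Prop := ∀ (water_mask : List (List Bool)) (land_mask : List (List Bool)), Dom_coastline_count_py water_mask land_mask → Pre_coastline_count_py water_mask land_mask → Spec_coastline_count_py water_mask land_mask (coastline_count_py water_mask land_mask)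

-- ===== LEMMAS AND PROOFS =====

-- A's per-cell predicate: land at (y,x) with some in-bounds water 4-neighbor
def pvQ (water land : List (List Bool)) (h w y x : Nat) : Bool :=
  pvW land y x &&
  ((decide (0 < x) && pvW water y (x - 1)) || (decide (x < w - 1) && pvW water y (x + 1)) ||
   (decide (0 < y) && pvW water (y - 1) x) || (decide (y < h - 1) && pvW water (y + 1) x))

-- A's nested counting loops as a sum of row counts
lemma pvA_sum (rows : List Nat) (w : Nat) (q : Nat → Nat → Bool) (c : Int) :
    rows.foldl (fun c y => (List.range w).foldl (fun c x => if q y x then c + 1 else c) c) c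
      = c + (rows.map (fun y => (((List.range w).countP (q y) : Nat) : Int))).sum := by
  induction rows generalizing c with
  | nil => simp
  | cons y ys ih =>
    rw [List.foldl_cons, PySem.List.foldl_count_if, ih, List.map_cons, List.sum_cons]
    ring

-- generic invariant for a fold that only ever adds elements to a dedup set
lemma pvFoldlSetInv {β : Type} (F : List (Int × Int) → β → List (Int × Int))
    (M : β → Int × Int → Prop)
    (hF : ∀ s b, s.Nodup → (F s b).Nodup ∧ (∀ p, p ∈ F s b ↔ p ∈ s ∨ M b p)) :
    ∀ (l : List β) (s : List (Int × Int)), s.Nodup →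
      (l.foldl F s).Nodup ∧ (∀ p, p ∈ l.foldl F s ↔ p ∈ s ∨ ∃ b ∈ l, M b p) := by
  intro l
  induction l with
  | nil => intro s hs; simpa using hs
  | cons b bs ih =>
    intro s hs
    obtain ⟨h1, h2⟩ := hF s b hs
    obtain ⟨h3, h4⟩ := ih (F s b) h1
    refine ⟨h3, fun p => ?_⟩
    rw [List.foldl_cons, h4 p, h2 p]
    simp only [List.mem_cons]
    constructor
    · rintro ((h | h) | ⟨b', hb', hM⟩)
      · exact Or.inl h
      · exact Or.inr ⟨b, Or.inl rfl, h⟩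
      · exact Or.inr ⟨b', Or.inr hb', hM⟩
    · rintro (h | ⟨b', rfl | hb', hM⟩)
      · exact Or.inl (Or.inl h)
      · exact Or.inl (Or.inr hM)
      · exact Or.inr ⟨b', hb', hM⟩

-- B's set after the full scan: nodup, with the expected membership
lemma pvB_set (water land : List (List Bool)) (h w : Nat) :
    ((List.range h).foldl (fun s y =>
      (List.range w).foldl (fun s x =>
        if pvW water y x = false then s
        else (pvNbrs y x).foldl (fun s p =>
          if pvOk land h w p then PySem.Set.add s p else s) s) s) PySem.Set.empty).Nodup ∧
    (∀ p, p ∈ ((List.range h).foldl (fun s y =>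
      (List.range w).foldl (fun s x =>
        if pvW water y x = false then s
        else (pvNbrs y x).foldl (fun s p =>
          if pvOk land h w p then PySem.Set.add s p else s) s) s) PySem.Set.empty) ↔
      ∃ y ∈ List.range h, ∃ x ∈ List.range w,
        pvW water y x = true ∧ p ∈ pvNbrs y x ∧ pvOk land h w p = true) := by
  have inner : ∀ (y x : Nat) (s : List (Int × Int)), s.Nodup →
      ((pvNbrs y x).foldl (fun s p => if pvOk land h w p then PySem.Set.add s p else s) s).Nodup ∧
      (∀ p, p ∈ (pvNbrs y x).foldl (fun s p => if pvOk land h w p then PySem.Set.add s p else s) s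
        ↔ p ∈ s ∨ (p ∈ pvNbrs y x ∧ pvOk land h w p = true)) := by
    intro y x s hs
    have hF : ∀ (s : List (Int × Int)) (b : Int × Int), s.Nodup →
        ((if pvOk land h w b then PySem.Set.add s b else s).Nodup ∧
         (∀ p, p ∈ (if pvOk land h w b then PySem.Set.add s b else s) ↔
            p ∈ s ∨ (p = b ∧ pvOk land h w p = true))) := by
      intro s b hs
      by_cases hb : pvOk land h w b = true
      · rw [if_pos hb]
        refine ⟨PySem.Set.nodup_add _ _ hs, fun p => ?_⟩
        rw [PySem.Set.mem_add]
        constructor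
        · rintro (h | rfl)
          exacts [Or.inl h, Or.inr ⟨rfl, hb⟩]
        · rintro (h | ⟨rfl, _⟩)
          exacts [Or.inl h, Or.inr rfl]
      · rw [if_neg hb]
        refine ⟨hs, fun p => ?_⟩
        constructor
        · exact Or.inl
        · rintro (h | ⟨rfl, hok⟩)
          exacts [h, absurd hok hb]
    obtain ⟨h1, h2⟩ := pvFoldlSetInv _ _ hF (pvNbrs y x) s hs
    refine ⟨h1, fun p => (h2 p).trans ?_⟩
    constructor
    · rintro (h | ⟨b, hb, rfl, hok⟩)
      exacts [Or.inl h, Or.inr ⟨hb, hok⟩]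
    · rintro (h | ⟨hb, hok⟩)
      exacts [Or.inl h, Or.inr ⟨p, hb, rfl, hok⟩]
  have middle : ∀ (y : Nat) (s : List (Int × Int)), s.Nodup →
      ((List.range w).foldl (fun s x =>
        if pvW water y x = false then s
        else (pvNbrs y x).foldl (fun s p => if pvOk land h w p then PySem.Set.add s p else s) s) s).Nodup ∧
      (∀ p, p ∈ (List.range w).foldl (fun s x =>
        if pvW water y x = false then s
        else (pvNbrs y x).foldl (fun s p => if pvOk land h w p then PySem.Set.add s p else s) s) s
        ↔ p ∈ s ∨ ∃ x ∈ List.range w,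
            pvW water y x = true ∧ p ∈ pvNbrs y x ∧ pvOk land h w p = true) := by
    intro y s hs
    refine pvFoldlSetInv _
      (fun x p => pvW water y x = true ∧ p ∈ pvNbrs y x ∧ pvOk land h w p = true)
      ?_ (List.range w) s hs
    intro s x hs
    cases hW : pvW water y x
    · rw [if_pos (by simp [hW])]
      refine ⟨hs, fun p => ?_⟩
      constructor
      · exact Or.inl
      · rintro (h | ⟨hc, _⟩)
        exacts [h, absurd hc (by simp [hW])]
    · rw [if_neg (by simp [hW])]
      obtain ⟨h1, h2⟩ := inner y x s hs
      refine ⟨h1, fun p => (h2 p).trans ?_⟩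
      constructor
      · rintro (h | ⟨hb, hok⟩)
        exacts [Or.inl h, Or.inr ⟨hW, hb, hok⟩]
      · rintro (h | ⟨_, hb, hok⟩)
        exacts [Or.inl h, Or.inr ⟨hb, hok⟩]
  have outer := pvFoldlSetInv _
      (fun y p => ∃ x ∈ List.range w,
          pvW water y x = true ∧ p ∈ pvNbrs y x ∧ pvOk land h w p = true)
      (fun s y hs => middle y s hs) (List.range h) PySem.Set.empty (by simp [PySem.Set.empty])
  obtain ⟨h1, h2⟩ := outer
  refine ⟨h1, fun p => (h2 p).trans ?_⟩
  simp [PySem.Set.empty]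

-- the heart: B's "land neighbor of a water pixel" positions are exactly A's counted cells
lemma pvBridge (water land : List (List Bool)) (h w : Nat) (p : Int × Int) :
    (∃ y ∈ List.range h, ∃ x ∈ List.range w,
        pvW water y x = true ∧ p ∈ pvNbrs y x ∧ pvOk land h w p = true)
      ↔ ∃ a ∈ List.range h, ∃ b ∈ List.range w,
          pvQ water land h w a b = true ∧ p = ((a : Int), (b : Int)) := by
  constructor
  · rintro ⟨y, hy, x, hx, hW, hnbr, hok⟩
    rw [List.mem_range] at hy hx
    unfold pvOk at hok
    simp only [Bool.and_eq_true, decide_eq_true_eq] at hok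
    obtain ⟨⟨⟨⟨h1, h2⟩, h3⟩, h4⟩, hL⟩ := hok
    simp only [pvNbrs, List.mem_cons, List.not_mem_nil, or_false] at hnbr
    rcases hnbr with rfl | rfl | rfl | rfl
    · -- p = (y, x-1): counted as land (y, x-1) with water right neighbor
      simp only at h1 h2 h3 h4 hL
      refine ⟨y, List.mem_range.mpr hy, x - 1, List.mem_range.mpr (by omega), ?_, ?_⟩
      · rw [show ((y : Int)).toNat = y from by omega,
            show ((x : Int) - 1).toNat = x - 1 from by omega] at hL
        unfold pvQ
        simp only [Bool.and_eq_true, Bool.or_eq_true, decide_eq_true_eq]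
        exact ⟨hL, Or.inl (Or.inl (Or.inr ⟨by omega, by rwa [show x - 1 + 1 = x from by omega]⟩))⟩
      · simp only [Prod.ext_iff]; constructor <;> push_cast <;> omega
    · -- p = (y, x+1): land (y, x+1) with water left neighbor
      simp only at h1 h2 h3 h4 hL
      refine ⟨y, List.mem_range.mpr hy, x + 1, List.mem_range.mpr (by omega), ?_, ?_⟩
      · rw [show ((y : Int)).toNat = y from by omega,
            show ((x : Int) + 1).toNat = x + 1 from by omega] at hL
        unfold pvQ
        simp only [Bool.and_eq_true, Bool.or_eq_true, decide_eq_true_eq]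
        exact ⟨hL, Or.inl (Or.inl (Or.inl ⟨by omega, by rwa [show x + 1 - 1 = x from by omega]⟩))⟩
      · simp only [Prod.ext_iff]; constructor <;> push_cast <;> omega
    · -- p = (y-1, x): land (y-1, x) with water below
      simp only at h1 h2 h3 h4 hL
      refine ⟨y - 1, List.mem_range.mpr (by omega), x, List.mem_range.mpr hx, ?_, ?_⟩
      · rw [show ((y : Int) - 1).toNat = y - 1 from by omega,
            show ((x : Int)).toNat = x from by omega] at hL
        unfold pvQ
        simp only [Bool.and_eq_true, Bool.or_eq_true, decide_eq_true_eq]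
        exact ⟨hL, Or.inr ⟨by omega, by rwa [show y - 1 + 1 = y from by omega]⟩⟩
      · simp only [Prod.ext_iff]; constructor <;> push_cast <;> omega
    · -- p = (y+1, x): land (y+1, x) with water above
      simp only at h1 h2 h3 h4 hL
      refine ⟨y + 1, List.mem_range.mpr (by omega), x, List.mem_range.mpr hx, ?_, ?_⟩
      · rw [show ((y : Int) + 1).toNat = y + 1 from by omega,
            show ((x : Int)).toNat = x from by omega] at hL
        unfold pvQ
        simp only [Bool.and_eq_true, Bool.or_eq_true, decide_eq_true_eq]
        exact ⟨hL, Or.inl (Or.inr ⟨by omega, by rwa [show y + 1 - 1 = y from by omega]⟩)⟩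
      · simp only [Prod.ext_iff]; constructor <;> push_cast <;> omega
  · rintro ⟨a, ha, b, hb, hQ, rfl⟩
    rw [List.mem_range] at ha hb
    unfold pvQ at hQ
    simp only [Bool.and_eq_true, Bool.or_eq_true, decide_eq_true_eq] at hQ
    obtain ⟨hL, hadj⟩ := hQ
    have hokp : pvOk land h w ((a : Int), (b : Int)) = true := by
      unfold pvOk
      simp only [Bool.and_eq_true, decide_eq_true_eq]
      refine ⟨⟨⟨⟨by omega, by omega⟩, by omega⟩, by omega⟩, ?_⟩
      rwa [show ((a : Int)).toNat = a from by omega, show ((b : Int)).toNat = b from by omega]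
    rcases hadj with ((⟨hb0, hWc⟩ | ⟨hbw, hWc⟩) | ⟨ha0, hWc⟩) | ⟨hah, hWc⟩
    · refine ⟨a, List.mem_range.mpr ha, b - 1, List.mem_range.mpr (by omega), hWc, ?_, hokp⟩
      simp only [pvNbrs, List.mem_cons]
      refine Or.inr (Or.inl ?_)
      simp only [Prod.ext_iff]; constructor <;> push_cast <;> omega
    · refine ⟨a, List.mem_range.mpr ha, b + 1, List.mem_range.mpr (by omega), hWc, ?_, hokp⟩
      simp only [pvNbrs, List.mem_cons]
      refine Or.inl ?_
      simp only [Prod.ext_iff]; constructor <;> push_cast <;> omega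
    · refine ⟨a - 1, List.mem_range.mpr (by omega), b, List.mem_range.mpr hb, hWc, ?_, hokp⟩
      simp only [pvNbrs, List.mem_cons]
      refine Or.inr (Or.inr (Or.inr (Or.inl ?_)))
      simp only [Prod.ext_iff]; constructor <;> push_cast <;> omega
    · refine ⟨a + 1, List.mem_range.mpr (by omega), b, List.mem_range.mpr hb, hWc, ?_, hokp⟩
      simp only [pvNbrs, List.mem_cons]
      refine Or.inr (Or.inr (Or.inl ?_))
      simp only [Prod.ext_iff]; constructor <;> push_cast <;> omega

-- both ports, with h and w generalized, count the same cells
lemma pv_main_gen (water land : List (List Bool)) (h w : Nat) :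
    (List.range h).foldl (fun count y =>
      (List.range w).foldl (fun count x =>
        if pvW land y x = false then count
        else if (decide (0 < x) && pvW water y (x - 1)) ||
                (decide (x < w - 1) && pvW water y (x + 1)) ||
                (decide (0 < y) && pvW water (y - 1) x) ||
                (decide (y < h - 1) && pvW water (y + 1) x)
        then count + 1 else count) count) (0 : Int)
    = (((List.range h).foldl (fun s y =>
        (List.range w).foldl (fun s x =>
          if pvW water y x = false then s
          else (pvNbrs y x).foldl (fun s p =>
            if pvOk land h w p then PySem.Set.add s p else s) s) s) PySem.Set.empty).length : Int) := by
  -- A's loops as a sum of per-row counts of pvQ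
  have e : (fun (c : Int) (y : Nat) => (List.range w).foldl (fun c x =>
        if pvW land y x = false then c
        else if (decide (0 < x) && pvW water y (x - 1)) ||
                (decide (x < w - 1) && pvW water y (x + 1)) ||
                (decide (0 < y) && pvW water (y - 1) x) ||
                (decide (y < h - 1) && pvW water (y + 1) x)
        then c + 1 else c) c)
      = (fun (c : Int) (y : Nat) => (List.range w).foldl (fun c x =>
          if pvQ water land h w y x then c + 1 else c) c) := by
    funext c y
    congr 1
    funext c x
    cases hL : pvW land y x
    · simp [pvQ, hL]
    · simp [pvQ, hL]
  rw [e, pvA_sum]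
  -- B's set is a permutation of the list of counted cells
  obtain ⟨hnd, hmem⟩ := pvB_set water land h w
  have hndT : (((List.range h ×ˢ List.range w).filter
      (fun p => pvQ water land h w p.1 p.2)).map
      (fun p => ((p.1 : Int), (p.2 : Int)))).Nodup := by
    refine List.Nodup.map ?_ (((List.nodup_range).product (List.nodup_range)).filter _)
    intro p q hpq
    simp only [Prod.ext_iff, Nat.cast_inj] at hpq
    exact Prod.ext hpq.1 hpq.2
  have hperm : (((List.range h).foldl (fun s y =>
        (List.range w).foldl (fun s x =>
          if pvW water y x = false then s
          else (pvNbrs y x).foldl (fun s p =>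
            if pvOk land h w p then PySem.Set.add s p else s) s) s) PySem.Set.empty)).Perm
      (((List.range h ×ˢ List.range w).filter
        (fun p => pvQ water land h w p.1 p.2)).map
        (fun p => ((p.1 : Int), (p.2 : Int)))) := by
    refine (List.perm_ext_iff_of_nodup hnd hndT).mpr fun p => ?_
    rw [hmem p, pvBridge]
    constructor
    · rintro ⟨a, ha, b, hb, hQ, rfl⟩
      refine List.mem_map.mpr ⟨(a, b), List.mem_filter.mpr ⟨?_, hQ⟩, rfl⟩
      exact List.pair_mem_product.mpr ⟨ha, hb⟩
    · intro hp
      obtain ⟨⟨a, b⟩, hq, rfl⟩ := List.mem_map.mp hp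
      obtain ⟨hq1, hq2⟩ := List.mem_filter.mp hq
      obtain ⟨ha, hb⟩ := List.pair_mem_product.mp hq1
      exact ⟨a, ha, b, hb, hq2, rfl⟩
  rw [hperm.length_eq, List.length_map, ← List.countP_eq_length_filter]
  have hprod : (List.range h ×ˢ List.range w)
      = (List.range h).flatMap (fun a => (List.range w).map (fun b => (a, b))) := rfl
  rw [hprod, List.countP_flatMap]
  rw [Nat.cast_list_sum, List.map_map, zero_add]
  refine congrArg List.sum (List.map_congr_left fun a _ => ?_)
  show _ = ((List.countP (fun p => pvQ water land h w p.1 p.2)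
      ((List.range w).map (fun b => (a, b))) : Nat) : Int)
  rw [List.countP_map]
  rfl

theorem pv_main (water land : List (List Bool)) :
    coastline_count_py water land = coastline_count_py_alt water land := by
  unfold coastline_count_py coastline_count_py_alt
  exact pv_main_gen water land _ _

-- ===== VERDICT (by name: the statement is the Claim_ definition above) =====
theorem coastline_count_py_spec : Claim_equal_coastline_count_py := by
  intro water land _ _
  unfold Spec_coastline_count_py
  exact pv_main water land
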